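-- pv_equiv track=rewrite | github.com/fiftyflowersai/flower-order-bot | final_data_cleaning.py | create_color_booleans
-- ===== SOURCE A (Python) =====
-- def create_color_booleans(colors_list, color_mapping):
--     """Create boolean columns based on color list and mapping"""
--     booleans = {
--         'has_red': False, 'has_pink': False, 'has_white': False,
--         'has_yellow': False, 'has_orange': False, 'has_purple': False,
--         'has_blue': False, 'has_green': False
--     }
--
--     for color in colors_list:
--         color_lower = color.lower().strip()
--         for category, color_list in color_mapping['color_categories'].items():
--             if color_lower in color_list:
--                 booleans[f'has_{category}'] = True
--
--     return booleans
-- ===== SOURCE B (Python) =====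
-- def create_color_booleans(colors_list, color_mapping):
--     """Create boolean columns based on color list and mapping (reverse-index version)"""
--     booleans = {f'has_{c}': False for c in
--                 ('red', 'pink', 'white', 'yellow', 'orange', 'purple', 'blue', 'green')}
--
--     # Reverse index color -> categories, built lazily once on the first color,
--     # so each input color needs a single lookup instead of a scan over every
--     # category's color list.
--     index = None
--     for color in colors_list:
--         if index is None:
--             index = {}
--             for category, color_list in color_mapping['color_categories'].items():
--                 for c in color_list:
--                     index.setdefault(c, []).append(category)
--         for category in index.get(color.lower().strip(), []):
--             booleans['has_' + category] = True
--
--     return booleans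
-- ===== Notes on version B (the rewrite author's own statement) =====
-- stated objective: faster
-- what changed: B builds a reverse index color -> categories from color_mapping['color_categories'] once (lazily, at the first color), so each input color is one dict lookup instead of a membership scan over every category's color list.
import Mathlib
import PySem

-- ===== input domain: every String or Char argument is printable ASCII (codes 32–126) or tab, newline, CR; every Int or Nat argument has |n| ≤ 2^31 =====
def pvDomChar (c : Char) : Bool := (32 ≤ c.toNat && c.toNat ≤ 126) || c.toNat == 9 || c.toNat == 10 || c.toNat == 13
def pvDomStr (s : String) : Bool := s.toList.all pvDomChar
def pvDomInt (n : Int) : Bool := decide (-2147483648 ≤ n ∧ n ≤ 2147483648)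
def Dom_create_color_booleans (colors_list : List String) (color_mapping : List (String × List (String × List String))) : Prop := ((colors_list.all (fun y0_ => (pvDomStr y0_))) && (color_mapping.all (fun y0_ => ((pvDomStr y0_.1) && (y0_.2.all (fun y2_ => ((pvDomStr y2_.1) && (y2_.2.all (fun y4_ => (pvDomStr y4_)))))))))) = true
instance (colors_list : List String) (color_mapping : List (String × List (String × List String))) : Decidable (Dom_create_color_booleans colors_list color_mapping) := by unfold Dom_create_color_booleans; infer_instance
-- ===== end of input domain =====

-- B replaces A's per-color scan over every category's color list by a reverse index
-- (color -> categories) built lazily once; objective: faster.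

-- ===== PORT A =====
def create_color_booleans (colors_list : List String) (color_mapping : List (String × List (String × List String))) : List (String × Bool) :=
    (colors_list.foldl (fun booleans color =>
        let color_lower := PySem.Str.strip (PySem.Str.lower color)
        match (PySem.Dict.mk color_mapping).get? "color_categories" with
        | none => booleans   -- Python raises KeyError here; unreachable under Pre_
        | some cats =>
          cats.foldl (fun booleans p =>
            if color_lower ∈ p.2 then booleans.insert ("has_" ++ p.1) true else booleans) booleans)
      (PySem.Dict.ofList
        [("has_red", false), ("has_pink", false), ("has_white", false),
         ("has_yellow", false), ("has_orange", false), ("has_purple", false),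
         ("has_blue", false), ("has_green", false)])).items

-- ===== PORT B =====
-- reverse index: color -> list of categories whose color list contains it
def pvIndex_create_color_booleans (cats : List (String × List String)) : PySem.Dict String (List String) :=
  cats.foldl (fun idx p => p.2.foldl (fun idx c => idx.modify c [] (· ++ [p.1])) idx) PySem.Dict.empty

def create_color_booleans_alt (colors_list : List String) (color_mapping : List (String × List (String × List String))) : List (String × Bool) :=
  -- state: (booleans, index); index = none until the first color initialises it
  (colors_list.foldl
      (fun (st : PySem.Dict String Bool × Option (PySem.Dict String (List String))) color =>
        let idx := match st.2 with
          | none => pvIndex_create_color_booleans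
                      ((PySem.Dict.mk color_mapping).getD "color_categories" [])
                      -- Python raises KeyError when the key is missing; unreachable under Pre_
          | some i => i
        ((idx.getD (PySem.Str.strip (PySem.Str.lower color)) []).foldl
            (fun booleans cat => booleans.insert ("has_" ++ cat) true) st.1,
         some idx))
      (PySem.Dict.ofList
        ((["red", "pink", "white", "yellow", "orange", "purple", "blue", "green"]).map
          (fun c => ("has_" ++ c, false))),
       none)).1.items

-- ===== PRECONDITION & SPEC =====
-- Pre_ admits exactly the inputs on which Python A (and B) returns: both raise
-- KeyError only when colors_list is non-empty and 'color_categories' is missing.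
def Pre_create_color_booleans (colors_list : List String) (color_mapping : List (String × List (String × List String))) : Prop :=
  colors_list = [] ∨ "color_categories" ∈ color_mapping.map Prod.fst
instance (colors_list : List String) (color_mapping : List (String × List (String × List String))) : Decidable (Pre_create_color_booleans colors_list color_mapping) := by unfold Pre_create_color_booleans; infer_instance

def pvWitness_create_color_booleans : List String × (List (String × List (String × List String))) :=
  (["Red "], [("color_categories", [("red", ["red", "crimson"]), ("blue", ["navy"])])])

def Spec_create_color_booleans (colors_list : List String) (color_mapping : List (String × List (String × List String))) (out : List (String × Bool)) : Prop := out = create_color_booleans_alt colors_list color_mapping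
instance (colors_list : List String) (color_mapping : List (String × List (String × List String))) (out : List (String × Bool)) : Decidable (Spec_create_color_booleans colors_list color_mapping out) := by unfold Spec_create_color_booleans; infer_instance

-- ===== CLAIM (what is proved, stated in full; the proofs are below) =====
def Claim_equal_create_color_booleans : Prop := ∀ (colors_list : List String) (color_mapping : List (String × List (String × List String))), Dom_create_color_booleans colors_list color_mapping → Pre_create_color_booleans colors_list color_mapping → Spec_create_color_booleans colors_list color_mapping (create_color_booleans colors_list color_mapping)

-- ===== LEMMAS AND PROOFS =====

-- inserting True at the same key n ≥ 1 times collapses to one insert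
theorem pv_foldl_replicate_insert (k : String) (n : Nat) (hn : 0 < n) (b : PySem.Dict String Bool) :
    (List.replicate n k).foldl (fun b cat => b.insert ("has_" ++ cat) true) b
      = b.insert ("has_" ++ k) true := by
  induction n generalizing b with
  | zero => omega
  | succ m ih =>
    rw [List.replicate_succ, List.foldl_cons]
    rcases Nat.eq_zero_or_pos m with hm | hm
    · subst hm; simp
    · rw [ih hm, PySem.Dict.insert_insert_self]

-- the reverse index at key k lists each category once per occurrence of k in its color list
theorem pv_index_getD (cats : List (String × List String)) (k : String) :
    (pvIndex_create_color_booleans cats).getD k []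
      = cats.flatMap (fun p => List.replicate (p.2.count k) p.1) := by
  unfold pvIndex_create_color_booleans
  suffices h : ∀ (cs : List (String × List String)) (idx : PySem.Dict String (List String)),
      (cs.foldl (fun idx p => p.2.foldl (fun idx c => idx.modify c [] (· ++ [p.1])) idx) idx).getD k []
        = idx.getD k [] ++ cs.flatMap (fun p => List.replicate (p.2.count k) p.1) by
    simpa using h cats PySem.Dict.empty
  intro cs
  induction cs with
  | nil => simp
  | cons p rest ih =>
    intro idx
    rw [List.foldl_cons, ih, List.flatMap_cons, ← List.append_assoc]
    congr 1
    have hmap : p.2.foldl (fun idx c => idx.modify c [] (· ++ [p.1])) idx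
        = (p.2.map (fun c => (c, p.1))).foldl (fun d q => d.modify q.1 [] (· ++ [q.2])) idx := by
      rw [List.foldl_map]
    rw [hmap, PySem.Dict.getD_foldl_modify_append]
    congr 1
    rw [List.filter_map]
    rw [List.map_map]
    have : List.filter ((fun p_1 => p_1.1 == k) ∘ fun c => (c, p.1)) p.2
        = List.filter (fun c => c == k) p.2 := by
      apply List.filter_congr; intro c _; rfl
    rw [this]
    rw [List.eq_replicate_iff]
    constructor
    · rw [List.length_map, List.count, List.countP_eq_length_filter]
    · intro b hb
      rcases List.mem_map.mp hb with ⟨c, _, hc⟩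
      exact hc.symm

-- A's scan over the categories equals B's fold over the reverse-index entry
theorem pv_inner_eq (cats : List (String × List String)) (key : String) (b : PySem.Dict String Bool) :
    cats.foldl (fun b p => if key ∈ p.2 then b.insert ("has_" ++ p.1) true else b) b
      = ((pvIndex_create_color_booleans cats).getD key []).foldl
          (fun b cat => b.insert ("has_" ++ cat) true) b := by
  rw [pv_index_getD]
  induction cats generalizing b with
  | nil => simp
  | cons p rest ih =>
    rw [List.foldl_cons, List.flatMap_cons, List.foldl_append]
    by_cases hk : key ∈ p.2
    · have hpos : 0 < p.2.count key := List.count_pos_iff.mpr hk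
      rw [if_pos hk, pv_foldl_replicate_insert _ _ hpos, ih]
    · have hz : p.2.count key = 0 := List.count_eq_zero.mpr hk
      rw [if_neg hk, hz]
      simp [ih]

-- B's lazy-initialised fold equals the unconditional fold with the fixed index
theorem pv_lazy_foldl (idx0 : PySem.Dict String (List String)) (l : List String)
    (b : PySem.Dict String Bool) (o : Option (PySem.Dict String (List String)))
    (ho : o = none ∨ o = some idx0) :
    (l.foldl
        (fun (st : PySem.Dict String Bool × Option (PySem.Dict String (List String))) color =>
          let idx := match st.2 with | none => idx0 | some i => i
          ((idx.getD (PySem.Str.strip (PySem.Str.lower color)) []).foldl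
              (fun booleans cat => booleans.insert ("has_" ++ cat) true) st.1,
           some idx))
        (b, o)).1
      = l.foldl (fun b color =>
          (idx0.getD (PySem.Str.strip (PySem.Str.lower color)) []).foldl
            (fun booleans cat => booleans.insert ("has_" ++ cat) true) b) b := by
  induction l generalizing b o with
  | nil => rfl
  | cons c rest ih =>
    rcases ho with h | h <;> subst h <;>
      simpa using ih _ (some idx0) (Or.inr rfl)

theorem pv_init_eq :
    (PySem.Dict.ofList
        ((["red", "pink", "white", "yellow", "orange", "purple", "blue", "green"]).map
          (fun c => (("has_" ++ c : String), false))) : PySem.Dict String Bool)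
      = PySem.Dict.ofList
        [("has_red", false), ("has_pink", false), ("has_white", false),
         ("has_yellow", false), ("has_orange", false), ("has_purple", false),
         ("has_blue", false), ("has_green", false)] := by decide

-- ===== VERDICT (by name: the statement is the Claim_ definition above) =====
theorem create_color_booleans_spec : Claim_equal_create_color_booleans := by
  intro colors_list color_mapping _ hpre
  unfold Spec_create_color_booleans create_color_booleans create_color_booleans_alt
  rw [pv_init_eq, pv_lazy_foldl _ _ _ _ (Or.inl rfl)]
  cases h : (PySem.Dict.mk color_mapping).get? "color_categories" with
  | some cats =>
    rw [PySem.Dict.getD_eq_get?_getD, h, Option.getD_some]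
    simp only [h]
    congr 1
    apply PySem.List.foldl_congr_mem
    intro acc color _
    simpa using pv_inner_eq cats (PySem.Str.strip (PySem.Str.lower color)) acc
  | none =>
    -- key missing: Pre_ forces colors_list = []
    rcases hpre with hnil | hmem
    · subst hnil; simp
    · rw [PySem.Dict.get?_eq_none_iff_not_mem_keys, PySem.Dict.keys_mk] at h
      exact absurd hmem h
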